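-- pv_equiv track=rewrite | github.com/ethanNguyenUser/Stenosis-And-Aneurysm-Imaging-EMC | back_of_the_bin.v5.1.01.py | generate_stack_order
-- ===== SOURCE A (Python) =====
-- def generate_stack_order(num_x_steps, num_y_steps):
--     stack_order = []
--     for y in range(num_y_steps):
--         row = list(range(y * num_x_steps, (y + 1) * num_x_steps))
--         if y % 2 == 1:
--             row.reverse()
--         stack_order.append(row)
--     return stack_order
-- ===== SOURCE B (Python) =====
-- def generate_stack_order(num_x_steps, num_y_steps):
--     stack_order = []
--     if num_y_steps > 0:
--         row = list(range(num_x_steps))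
--         for _ in range(num_y_steps):
--             stack_order.append(row)
--             row = [v + num_x_steps for v in reversed(row)]
--     return stack_order
-- ===== Notes on version B (the rewrite author's own statement) =====
-- stated objective: alternative
-- what changed: B builds the snake grid incrementally: it keeps only the current row and derives each next row by reversing the previous one and adding num_x_steps, so there is no per-row range() construction, no multiplication and no parity test at all.
import Mathlib
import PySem

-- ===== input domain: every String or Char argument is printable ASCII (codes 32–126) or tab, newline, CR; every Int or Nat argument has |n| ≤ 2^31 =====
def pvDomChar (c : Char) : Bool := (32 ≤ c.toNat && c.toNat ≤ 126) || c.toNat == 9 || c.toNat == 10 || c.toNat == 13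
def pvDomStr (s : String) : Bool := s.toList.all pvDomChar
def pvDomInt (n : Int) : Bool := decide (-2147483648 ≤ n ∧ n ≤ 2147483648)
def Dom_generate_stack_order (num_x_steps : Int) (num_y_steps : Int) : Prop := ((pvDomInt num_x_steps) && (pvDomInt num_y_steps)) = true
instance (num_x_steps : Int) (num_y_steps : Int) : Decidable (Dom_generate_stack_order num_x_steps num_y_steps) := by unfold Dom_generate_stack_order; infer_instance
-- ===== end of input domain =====

-- B builds the grid incrementally, deriving each row from the previous one (reverse, then add num_x_steps), with no range construction, multiplication or parity test (objective: alternative).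

-- ===== PORT A =====
def generate_stack_order (num_x_steps : Int) (num_y_steps : Int) : List (List Int) :=
  (PySem.List.pyRange 0 num_y_steps 1).foldl (fun stack_order y =>
    let row := PySem.List.pyRange (y * num_x_steps) ((y + 1) * num_x_steps) 1
    let row := if PySem.Int.mod y 2 == 1 then row.reverse else row
    stack_order ++ [row]) []

-- ===== PORT B =====
def generate_stack_order_alt (num_x_steps : Int) (num_y_steps : Int) : List (List Int) :=
  if num_y_steps > 0 then
  ((PySem.List.pyRange 0 num_y_steps 1).foldl (fun (st : List (List Int) × List Int) _ =>
    (st.1 ++ [st.2], st.2.reverse.map (fun v => v + num_x_steps)))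
    ([], PySem.List.pyRange 0 num_x_steps 1)).1
  else []

-- ===== PRECONDITION & SPEC =====
def Spec_generate_stack_order (num_x_steps : Int) (num_y_steps : Int) (out : List (List Int)) : Prop := out = generate_stack_order_alt num_x_steps num_y_steps
instance (num_x_steps : Int) (num_y_steps : Int) (out : List (List Int)) : Decidable (Spec_generate_stack_order num_x_steps num_y_steps out) := by unfold Spec_generate_stack_order; infer_instance

-- ===== CLAIM =====
def Claim_equal_generate_stack_order : Prop := ∀ (num_x_steps : Int) (num_y_steps : Int), Dom_generate_stack_order num_x_steps num_y_steps → Spec_generate_stack_order num_x_steps num_y_steps (generate_stack_order num_x_steps num_y_steps)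

-- ===== LEMMAS AND PROOFS =====

-- A's row for index y, as a named function.
def rowA (nx y : Int) : List Int :=
  if PySem.Int.mod y 2 == 1
    then (PySem.List.pyRange (y * nx) ((y + 1) * nx) 1).reverse
    else PySem.List.pyRange (y * nx) ((y + 1) * nx) 1

theorem range_shift (nx y : Int) :
    (PySem.List.pyRange (y * nx) ((y + 1) * nx) 1).map (fun v => v + nx)
      = PySem.List.pyRange ((y + 1) * nx) ((y + 1 + 1) * nx) 1 := by
  rw [PySem.List.pyRange_one, PySem.List.pyRange_one]
  have h1 : ((y + 1) * nx - y * nx) = nx := by ring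
  have h2 : ((y + 1 + 1) * nx - (y + 1) * nx) = nx := by ring
  rw [h1, h2, List.map_map]
  apply List.map_congr_left
  intro k _
  simp only [Function.comp_apply]
  ring

theorem parity_flip (y : Int) :
    (PySem.Int.mod (y + 1) 2 == 1) = !(PySem.Int.mod y 2 == 1) := by
  rw [PySem.Int.mod_eq_emod_of_pos (a := y) (by norm_num),
      PySem.Int.mod_eq_emod_of_pos (a := y + 1) (by norm_num)]
  have hy : y % 2 = 0 ∨ y % 2 = 1 := by omega
  rcases hy with h | h <;> simp [Int.add_emod, h]

-- The step transformation carries A's row y to A's row y+1.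
theorem rowA_step (nx y : Int) :
    (rowA nx y).reverse.map (fun v => v + nx) = rowA nx (y + 1) := by
  unfold rowA
  rw [parity_flip]
  cases h : (PySem.Int.mod y 2 == 1) with
  | true =>
    rw [if_pos rfl, if_neg (by simp), List.reverse_reverse, range_shift]
  | false =>
    rw [if_neg (by simp), if_pos (by simp), List.map_reverse, range_shift]

-- The fold that ignores its list element, characterised over any list.
theorem fold_iter (nx : Int) (l : List Int) (acc : List (List Int)) (y : Int) :
    l.foldl (fun (st : List (List Int) × List Int) _ =>
        (st.1 ++ [st.2], st.2.reverse.map (fun v => v + nx)))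
      (acc, rowA nx y)
    = (acc ++ (List.range l.length).map (fun k : Nat => rowA nx (y + (k : Int))),
       rowA nx (y + (l.length : Int))) := by
  induction l generalizing acc y with
  | nil => simp
  | cons a t ih =>
    simp only [List.foldl_cons, rowA_step nx y, ih (acc ++ [rowA nx y]) (y + 1),
      List.length_cons, Prod.mk.injEq]
    constructor
    · rw [List.append_assoc]
      congr 1
      rw [List.range_succ_eq_map]
      simp only [List.map_cons, List.map_map, List.singleton_append]
      congr 1
      · congr 1; omega
      · apply List.map_congr_left
        intro k _
        simp only [Function.comp_apply]
        congr 1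
        push_cast
        ring
    · congr 1
      push_cast
      ring

theorem foldl_append_map {α β : Type} (f : α → β) (l : List α) (init : List β) :
    l.foldl (fun acc y => acc ++ [f y]) init = init ++ l.map f := by
  induction l generalizing init with
  | nil => simp
  | cons a t ih => simp [List.foldl_cons, ih]

theorem rowA_zero (nx : Int) : rowA nx 0 = PySem.List.pyRange 0 nx 1 := by
  unfold rowA
  rw [show PySem.Int.mod 0 2 = 0 from by decide]
  simp

-- ===== VERDICT =====
theorem generate_stack_order_spec : Claim_equal_generate_stack_order := by
  intro nx ny _
  unfold Spec_generate_stack_order generate_stack_order generate_stack_order_alt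
  by_cases hny : ny > 0
  case neg =>
    rw [if_neg hny, PySem.List.pyRange_one_eq_nil (by omega)]
    rfl
  rw [if_pos hny]
  rw [show (fun (stack_order : List (List Int)) y =>
      let row := PySem.List.pyRange (y * nx) ((y + 1) * nx) 1
      let row := if PySem.Int.mod y 2 == 1 then row.reverse else row
      stack_order ++ [row]) = (fun acc y => acc ++ [rowA nx y]) from rfl,
    foldl_append_map (rowA nx) (PySem.List.pyRange 0 ny 1) [],
    ← rowA_zero nx, fold_iter nx (PySem.List.pyRange 0 ny 1) [] 0]
  simp only [List.nil_append, PySem.List.length_pyRange_one]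
  rw [PySem.List.pyRange_one 0 ny, List.map_map]
  apply List.map_congr_left
  intro k _
  simp
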